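-- pv_equiv track=rewrite | github.com/pypi-data/pypi-mirror-9 | packages/pyarmor/pyarmor-2.2.1.tar.gz/pyarmor-2.2.1/pyarmor.py | format_kv
-- ===== SOURCE A (Python) =====
-- def format_kv(keystr):
--     counter = 0
--     for c in keystr:
--         if c in '0123456789abcdefABCEDF':
--             counter += 1
--             if counter % 16 == 0:
--                 yield h + c + '\n'
--             elif counter % 2 == 0:
--                 yield h + c + ' '
--             else:
--                 h = c
-- ===== SOURCE B (Python) =====
-- def format_kv(keystr):
--     digits = [c for c in keystr if c in '0123456789abcdefABCDEF']
--     it = iter(digits)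
--     for j, (a, b) in enumerate(zip(it, it), 1):
--         yield a + b + ('\n' if j % 8 == 0 else ' ')
-- ===== Notes on version B (the rewrite author's own statement) =====
-- stated objective: simpler
-- what changed: B first filters the hex characters into a list, then pairs them up with zip(it,it) and emits one string per pair with a 1-based pair index (newline every 8th pair), replacing A's per-character counter/stored-h/mod-2/mod-16 state machine.
import Mathlib
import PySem

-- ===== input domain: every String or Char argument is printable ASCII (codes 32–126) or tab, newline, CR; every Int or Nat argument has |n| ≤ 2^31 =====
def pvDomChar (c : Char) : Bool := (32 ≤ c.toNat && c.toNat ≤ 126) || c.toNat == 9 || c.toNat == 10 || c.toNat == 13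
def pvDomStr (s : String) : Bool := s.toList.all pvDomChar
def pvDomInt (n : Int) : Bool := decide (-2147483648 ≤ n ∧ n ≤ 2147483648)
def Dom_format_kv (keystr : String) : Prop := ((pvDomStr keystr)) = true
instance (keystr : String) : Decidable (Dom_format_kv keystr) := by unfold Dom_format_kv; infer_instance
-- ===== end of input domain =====

-- B replaces A's per-character counter/stored-character state machine by filter-then-pair with a pair index (objective: simpler).

-- ===== PORT A =====
-- A's membership literal '0123456789abcdefABCEDF', character by character (it lists A–F, with E before D)
def hexA : List Char := ['0','1','2','3','4','5','6','7','8','9','a','b','c','d','e','f','A','B','C','E','D','F']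

-- the generator loop of A: state = (counter, h); initial h is a placeholder, Python's h is
-- always assigned (counter odd branch) before it is first read (counter even branches)
def loopA : List Char → Nat → Char → List String
  | [], _, _ => []
  | c :: cs, counter, h =>
    if c ∈ hexA then
      let counter' := counter + 1
      if counter' % 16 = 0 then String.ofList [h, c, '\n'] :: loopA cs counter' h
      else if counter' % 2 = 0 then String.ofList [h, c, ' '] :: loopA cs counter' h
      else loopA cs counter' c
    else loopA cs counter h

def format_kv (keystr : String) : List String := loopA keystr.toList 0 ' '

-- ===== PORT B =====
def hexB : List Char := ['0','1','2','3','4','5','6','7','8','9','a','b','c','d','e','f','A','B','C','D','E','F']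

-- zip(it, it) over one iterator = the list of consecutive disjoint pairs (exact: drops a trailing odd element)
def pairUp : List Char → List (Char × Char)
  | a :: b :: rest => (a, b) :: pairUp rest
  | _ => []

def format_kv_alt (keystr : String) : List String :=
  let digits := keystr.toList.filter (fun c => decide (c ∈ hexB))
  (PySem.List.enumerate (pairUp digits) 1).map
    (fun p => String.ofList [p.2.1, p.2.2, if p.1 % 8 = 0 then '\n' else ' '])
  -- j % 8: the pair index is ≥ 1 and the divisor 8 is positive, so Lean's Int % equals Python's % here

-- ===== PRECONDITION & SPEC =====
def Spec_format_kv (keystr : String) (out : List String) : Prop := out = format_kv_alt keystr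
instance (keystr : String) (out : List String) : Decidable (Spec_format_kv keystr out) := by unfold Spec_format_kv; infer_instance

-- ===== CLAIM (what is proved, stated in full; the proofs are below) =====
def Claim_equal_format_kv : Prop := ∀ (keystr : String), Dom_format_kv keystr → Spec_format_kv keystr (format_kv keystr)

-- ===== LEMMAS AND PROOFS =====

theorem mem_hexA_iff_hexB (c : Char) : c ∈ hexA ↔ c ∈ hexB := by
  simp only [hexA, hexB, List.mem_cons, List.not_mem_nil]
  tauto

-- skipping the non-hex characters first does not change A's output
theorem loopA_filter (cs : List Char) : ∀ (n : Nat) (h : Char),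
    loopA cs n h = loopA (cs.filter (fun c => decide (c ∈ hexB))) n h := by
  induction cs with
  | nil => intro n h; rfl
  | cons c cs ih =>
    intro n h
    by_cases hc : c ∈ hexA
    · have hb : c ∈ hexB := (mem_hexA_iff_hexB c).mp hc
      simp only [List.filter_cons, hb, decide_true, loopA, hc, if_true]
      split <;> first | (split <;> rw [ih]) | rw [ih]
    · have hb : c ∉ hexB := fun h' => hc ((mem_hexA_iff_hexB c).mpr h')
      simp only [List.filter_cons, hb, decide_false, loopA, if_neg hc]
      exact ih n h

-- on an all-hex list with an even counter 2*j, A's loop emits exactly one string per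
-- consecutive pair, with a newline on pairs whose 1-based index j+1, j+2, … is ≡ 0 mod 8
theorem loopA_pairs : ∀ (hs : List Char), (∀ c ∈ hs, c ∈ hexA) →
    ∀ (j : Nat) (h : Char),
    loopA hs (2 * j) h
      = (PySem.List.enumerate (pairUp hs) ((j : Int) + 1)).map
          (fun p => String.ofList [p.2.1, p.2.2, if p.1 % 8 = 0 then '\n' else ' ']) := by
  intro hs
  induction hs using pairUp.induct with
  | case1 a b rest ih =>
    intro hhex j h
    have ha : a ∈ hexA := hhex a (by simp)
    have hb : b ∈ hexA := hhex b (by simp)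
    have hrest : ∀ c ∈ rest, c ∈ hexA := fun c hc => hhex c (by simp [hc])
    have h1 : ¬ (2 * j + 1) % 16 = 0 := by omega
    have h2 : ¬ (2 * j + 1) % 2 = 0 := by omega
    simp only [loopA, if_pos ha, if_pos hb, h1, h2, if_false, pairUp,
      PySem.List.enumerate_cons, List.map_cons]
    have step : 2 * j + 1 + 1 = 2 * (j + 1) := by omega
    rw [step]
    have hmod : ((2 * (j + 1)) % 16 = 0) ↔ (((j : Int) + 1) % 8 = 0) := by omega
    have ihr := ih hrest (j + 1) a
    have harg : (2 * (j + 1) : Nat) = 2 * (j + 1) := rfl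
    have hcast : ((j : Int) + 1) + 1 = ((j + 1 : Nat) : Int) + 1 := by push_cast; ring
    by_cases hc : (2 * (j + 1)) % 16 = 0
    · have hc' : ((j : Int) + 1) % 8 = 0 := hmod.mp hc
      rw [if_pos hc, if_pos hc', ihr, hcast]
    · have hc' : ¬ ((j : Int) + 1) % 8 = 0 := fun h' => hc (hmod.mpr h')
      have he : (2 * (j + 1)) % 2 = 0 := by omega
      rw [if_neg hc, if_pos he, if_neg hc', ihr, hcast]
  | case2 l hl =>
    intro hhex j h
    match l, hl with
    | [], _ => simp [loopA, pairUp, PySem.List.enumerate_nil]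
    | [a], _ =>
      have ha : a ∈ hexA := hhex a (by simp)
      have h1 : ¬ (2 * j + 1) % 16 = 0 := by omega
      have h2 : ¬ (2 * j + 1) % 2 = 0 := by omega
      simp [loopA, ha, h1, pairUp, PySem.List.enumerate_nil]
    | a :: b :: r, hl => exact absurd rfl (fun h => hl a b r h)

-- ===== VERDICT (by name: the statement is the Claim_ definition above) =====
theorem format_kv_spec : Claim_equal_format_kv := by
  intro keystr _
  unfold Spec_format_kv format_kv format_kv_alt
  rw [loopA_filter]
  have hhex : ∀ c ∈ keystr.toList.filter (fun c => decide (c ∈ hexB)), c ∈ hexA := by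
    intro c hc
    exact (mem_hexA_iff_hexB c).mpr (by simpa using (List.mem_filter.mp hc).2)
  have := loopA_pairs (keystr.toList.filter (fun c => decide (c ∈ hexB))) hhex 0 ' '
  simpa using this
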